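-- pv_equiv track=rewrite | github.com/mlp6/fem | fem/dyna/find_folders.py | get_param_str
-- ===== SOURCE A (Python) =====
-- def get_param_str(path, partial_param_str):
--     """
--     Extracts the parameter string from the given path starting with the partial parameter string
--     and ending before the next '&' or '/' character.
--     """
--     idx_param_str_start = path.find(partial_param_str)
--     if idx_param_str_start == -1:
--         return ""
--
--     # Find indices of '&' and '/' characters in the path
--     idx_ampersand = [i for i, c in enumerate(path) if c == "&"]
--     idx_slash = [i for i, c in enumerate(path) if c == "/"]
--     idx_arr = sorted(idx_ampersand + idx_slash)
--
--     # Subtract the start index to find positions after the parameter string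
--     idx_arr = [i - idx_param_str_start for i in idx_arr]
--     idx_arr = [i for i in idx_arr if i > 0]  # Remove negative values
--
--     if idx_arr:
--         idx_first_and_after_param_str_start = min(idx_arr)
--         # Adjust index to exclude the '&' or '/' character
--         idx_param_str_end = (
--             idx_param_str_start + idx_first_and_after_param_str_start - 1
--         )
--     else:
--         # If no '&' or '/' found after the parameter, take the rest of the string
--         idx_param_str_end = len(path) - 1
--
--     # Extract the parameter string
--     param_str = path[idx_param_str_start : idx_param_str_end + 1]
--     return param_str
-- ===== SOURCE B (Python) =====
-- def get_param_str(path, partial_param_str):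
--     """Single forward scan for the first '&' or '/' after the match start;
--     no index lists, no sort."""
--     start = path.find(partial_param_str)
--     if start == -1:
--         return ""
--     end = len(path)
--     for i in range(start + 1, len(path)):
--         if path[i] == "&" or path[i] == "/":
--             end = i
--             break
--     return path[start:end]
-- ===== Notes on version B (the rewrite author's own statement) =====
-- stated objective: simpler
-- what changed: Replaces building two full index lists of all '&'/'/' positions, concatenating, sorting, offset-subtracting, filtering and taking a min with one early-terminating scan from start+1 that stops at the first delimiter.
import Mathlib
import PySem

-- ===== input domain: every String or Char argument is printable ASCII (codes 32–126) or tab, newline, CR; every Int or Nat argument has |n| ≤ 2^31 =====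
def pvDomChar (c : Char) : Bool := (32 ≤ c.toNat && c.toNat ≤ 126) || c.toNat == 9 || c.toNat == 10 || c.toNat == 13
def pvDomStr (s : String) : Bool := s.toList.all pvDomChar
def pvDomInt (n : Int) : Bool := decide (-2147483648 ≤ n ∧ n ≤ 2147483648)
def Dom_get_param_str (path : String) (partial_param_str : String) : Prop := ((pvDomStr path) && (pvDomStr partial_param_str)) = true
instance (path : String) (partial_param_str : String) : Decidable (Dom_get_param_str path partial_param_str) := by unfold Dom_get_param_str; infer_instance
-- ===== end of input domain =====

-- B replaces A's full delimiter-index lists + sort + min with one early-terminating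
-- scan from start+1 for the first delimiter; objective: simpler.

-- ===== PORT A =====
def get_param_str (path : String) (partial_param_str : String) : String :=
  let s := path.toList
  let idx_param_str_start := PySem.Str.find path partial_param_str
  if idx_param_str_start = -1 then ""
  else
    let idx_ampersand := ((PySem.List.enumerate s).filter (fun p => p.2 == '&')).map (·.1)
    let idx_slash := ((PySem.List.enumerate s).filter (fun p => p.2 == '/')).map (·.1)
    let idx_arr := PySem.List.sorted (idx_ampersand ++ idx_slash) (fun i => i) false
    let idx_arr := idx_arr.map (fun i => i - idx_param_str_start)
    let idx_arr := idx_arr.filter (fun i => decide (0 < i))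
    let idx_param_str_end : Int :=
      match PySem.List.min? idx_arr (fun i => i) with
      | some m => idx_param_str_start + m - 1
      | none => (s.length : Int) - 1
    String.ofList (PySem.List.slice s (some idx_param_str_start) (some (idx_param_str_end + 1)))

-- ===== PORT B =====
-- the for-loop of Source B: first offset (from the head of the given suffix) holding '&' or '/'
def pvScanDelim : List Char → Option Nat
  | [] => none
  | c :: cs => if c = '&' ∨ c = '/' then some 0 else (pvScanDelim cs).map (· + 1)

def get_param_str_alt (path : String) (partial_param_str : String) : String :=
  let s := path.toList
  let start := PySem.Str.find path partial_param_str
  if start = -1 then ""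
  else
    let st := start.toNat
    let e : Nat :=
      match pvScanDelim (s.drop (st + 1)) with
      | some k => st + 1 + k
      | none => s.length
    String.ofList (PySem.List.slice s (some (Int.ofNat st)) (some (Int.ofNat e)))

-- ===== PRECONDITION & SPEC =====
def Spec_get_param_str (path : String) (partial_param_str : String) (out : String) : Prop := out = get_param_str_alt path partial_param_str
instance (path : String) (partial_param_str : String) (out : String) : Decidable (Spec_get_param_str path partial_param_str out) := by unfold Spec_get_param_str; infer_instance

-- ===== CLAIM (what is proved, stated in full; the proofs are below) =====
def Claim_equal_get_param_str : Prop := ∀ (path : String) (partial_param_str : String), Dom_get_param_str path partial_param_str → Spec_get_param_str path partial_param_str (get_param_str path partial_param_str)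

-- ===== LEMMAS AND PROOFS =====

theorem pvScanDelim_none {t : List Char} (h : pvScanDelim t = none) :
    ∀ i : Nat, ¬ (t[i]? = some '&' ∨ t[i]? = some '/') := by
  induction t with
  | nil => intro i; simp
  | cons c cs ih =>
    simp only [pvScanDelim] at h
    split at h
    · exact absurd h (by simp)
    · intro i
      cases i with
      | zero => simpa using ‹¬ (c = '&' ∨ c = '/')›
      | succ j =>
        simp only [Option.map_eq_none_iff] at h
        simpa using ih h j

theorem pvScanDelim_some {t : List Char} {k : Nat} (h : pvScanDelim t = some k) :
    (t[k]? = some '&' ∨ t[k]? = some '/') ∧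
      ∀ i : Nat, i < k → ¬ (t[i]? = some '&' ∨ t[i]? = some '/') := by
  induction t generalizing k with
  | nil => simp [pvScanDelim] at h
  | cons c cs ih =>
    simp only [pvScanDelim] at h
    split at h
    · rename_i hc
      have hk : k = 0 := by simpa using h.symm
      subst hk
      refine ⟨by simpa using hc, by omega⟩
    · rename_i hc
      simp only [Option.map_eq_some_iff] at h
      obtain ⟨k', hk', rfl⟩ := h
      obtain ⟨h1, h2⟩ := ih hk'
      refine ⟨by simpa using h1, ?_⟩
      intro i hi
      cases i with
      | zero => simpa using hc
      | succ j => simpa using h2 j (by omega)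

-- membership in A's sorted/offset/filtered index list
theorem pvMemL (s : List Char) (st : Int) (x : Int) :
    x ∈ ((PySem.List.sorted
        ((((PySem.List.enumerate s).filter (fun p => p.2 == '&')).map (·.1)) ++
         (((PySem.List.enumerate s).filter (fun p => p.2 == '/')).map (·.1)))
        (fun i => i) false).map (fun i => i - st)).filter (fun i => decide (0 < i)) ↔
      ∃ j : Nat, (s[j]? = some '&' ∨ s[j]? = some '/') ∧ x = (j : Int) - st ∧ 0 < x := by
  simp only [List.mem_filter, List.mem_map, PySem.List.mem_sorted, List.mem_append,
    PySem.List.mem_enumerate_iff, decide_eq_true_eq]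
  constructor
  · rintro ⟨⟨a, ⟨p, ⟨⟨j, hj, rfl⟩, hc⟩, rfl⟩ | ⟨p, ⟨⟨j, hj, rfl⟩, hc⟩, rfl⟩, rfl⟩, hpos⟩
    · exact ⟨j, Or.inl (by simp only [List.getElem?_eq_getElem hj]; simp_all), by simp, hpos⟩
    · exact ⟨j, Or.inr (by simp only [List.getElem?_eq_getElem hj]; simp_all), by simp, hpos⟩
  · rintro ⟨j, hdel, rfl, hpos⟩
    have hj : j < s.length := by
      rcases hdel with h | h <;> exact (List.getElem?_eq_some_iff.mp h).1
    refine ⟨⟨(j : Int), ?_, by simp⟩, hpos⟩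
    rcases hdel with h | h
    · exact Or.inl ⟨(0 + (j : Int), s[j]), ⟨⟨j, hj, rfl⟩,
        by simpa using (List.getElem?_eq_some_iff.mp h).2⟩, by simp⟩
    · exact Or.inr ⟨(0 + (j : Int), s[j]), ⟨⟨j, hj, rfl⟩,
        by simpa using (List.getElem?_eq_some_iff.mp h).2⟩, by simp⟩

-- ===== VERDICT (by name: the statement is the Claim_ definition above) =====
theorem get_param_str_spec : Claim_equal_get_param_str := by
  intro path partial_param_str _
  unfold Spec_get_param_str
  simp only [get_param_str, get_param_str_alt, Int.ofNat_eq_natCast]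
  by_cases hneg : PySem.Str.find path partial_param_str = -1
  · rw [hneg]; simp
  · rw [if_neg hneg, if_neg hneg]
    set s := path.toList with hs
    set f := PySem.Str.find path partial_param_str with hf
    have hge : 0 ≤ f := by
      have h1 : -1 ≤ f := by
        rw [hf, PySem.Str.find_eq]; exact PySem.Chars.neg_one_le_find _ _
      omega
    set st := f.toNat with hst
    have hfs : f = (st : Int) := (Int.toNat_of_nonneg hge).symm
    set L := ((PySem.List.sorted
        ((((PySem.List.enumerate s).filter (fun p => p.2 == '&')).map (·.1)) ++
         (((PySem.List.enumerate s).filter (fun p => p.2 == '/')).map (·.1)))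
        (fun i => i) false).map (fun i => i - f)).filter (fun i => decide (0 < i)) with hL
    have hmem : ∀ x : Int, x ∈ L ↔
        ∃ j : Nat, (s[j]? = some '&' ∨ s[j]? = some '/') ∧ x = (j : Int) - f ∧ 0 < x := by
      intro x; rw [hL]; exact pvMemL s f x
    cases hscan : pvScanDelim (s.drop (st + 1)) with
    | none =>
      have hempty : L = [] := by
        rw [List.eq_nil_iff_forall_not_mem]
        intro x hx
        obtain ⟨j, hdel, rfl, hpos⟩ := (hmem x).mp hx
        have hjst : st + 1 ≤ j := by omega
        have hdrop : (s.drop (st + 1))[j - (st + 1)]? = s[j]? := by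
          rw [List.getElem?_drop]; congr 1; omega
        exact pvScanDelim_none hscan (j - (st + 1)) (by rw [hdrop]; exact hdel)
      rw [hempty]
      simp only [PySem.List.min?, List.foldl_nil]
      rw [show ((s.length : Int) - 1 + 1) = (s.length : Int) by omega,
        show f = (st : Int) by omega]
    | some k =>
      obtain ⟨hdk, hmin⟩ := pvScanDelim_some hscan
      have hdk' : s[st + 1 + k]? = some '&' ∨ s[st + 1 + k]? = some '/' := by
        rwa [List.getElem?_drop] at hdk
      have hin : ((k : Int) + 1) ∈ L := by
        rw [hmem]
        exact ⟨st + 1 + k, hdk', by omega, by omega⟩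
      obtain ⟨m, hm⟩ : ∃ m, PySem.List.min? L (fun i => i) = some m := by
        cases h : PySem.List.min? L (fun i => i) with
        | none => rw [PySem.List.min?_eq_none_iff] at h; simp [h] at hin
        | some m => exact ⟨m, rfl⟩
      have hmmem := PySem.List.min?_mem hm
      have hmle : m ≤ (k : Int) + 1 := PySem.List.min?_isMin hm _ hin
      have hmge : (k : Int) + 1 ≤ m := by
        obtain ⟨j, hdel, hjm, hpos⟩ := (hmem m).mp hmmem
        by_contra hlt
        have hjst : st + 1 ≤ j := by omega
        have hjk : j - (st + 1) < k := by omega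
        have hdrop : (s.drop (st + 1))[j - (st + 1)]? = s[j]? := by
          rw [List.getElem?_drop]; congr 1; omega
        exact hmin _ hjk (by rw [hdrop]; exact hdel)
      have hmeq : m = (k : Int) + 1 := le_antisymm hmle hmge
      rw [hm, hmeq]
      rw [show f + ((k : Int) + 1) - 1 + 1 = ((st + 1 + k : Nat) : Int) by omega,
        show f = (st : Int) by omega]
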